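-- pv_equiv track=rewrite | github.com/981377660LMT/algorithm-study | 11_动态规划/经典题/dfs+cache/Spiky Plants.py | solve
-- ===== SOURCE A (Python) =====
-- from functools import lru_cache
--
-- INF = int(1e20)
--
-- def solve(heights, costs):
--     """最小成本增加植物的高度，使得相邻高度不同"""
--
--     @lru_cache(None)
--     def dfs(index: int, pre: int) -> int:
--         """复杂度O(3*n)"""
--         if index == n:
--             return 0
--
--         res = INF
--         for i in range(3):
--             if heights[index] + i != pre:
--                 res = min(res, costs[index] * i + dfs(index + 1, heights[index] + i))
--         return res
--
--     n = len(heights)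
--     res = dfs(0, INF)
--     dfs.cache_clear()
--     return res
-- ===== SOURCE B (Python) =====
-- INF = int(1e20)
--
-- def solve(heights, costs):
--     """Bottom-up iterative 3-state DP (rolling table) instead of memoized recursion."""
--     n = len(heights)
--     if n == 0:
--         return 0
--     # g[m] = min cost for the suffix starting at i+1 given plant i was raised by m
--     g = [0, 0, 0]
--     for i in range(n - 1, 0, -1):
--         ng = []
--         for j in range(3):
--             best = INF
--             for m in range(3):
--                 if heights[i] + m != heights[i - 1] + j:
--                     best = min(best, costs[i] * m + g[m])
--             ng.append(best)
--         g = ng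
--     best = INF
--     for m in range(3):
--         best = min(best, costs[0] * m + g[m])
--     return best
-- ===== Notes on version B (the rewrite author's own statement) =====
-- stated objective: faster
-- what changed: Replaced the lru_cache top-down recursion over (index, previous height) by a bottom-up iterative DP that threads a single rolling 3-state table backward over the plants.
-- outside the precondition, e.g. on solve([1, 2], [1]): A raises IndexError, B raises IndexError
import Mathlib
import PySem

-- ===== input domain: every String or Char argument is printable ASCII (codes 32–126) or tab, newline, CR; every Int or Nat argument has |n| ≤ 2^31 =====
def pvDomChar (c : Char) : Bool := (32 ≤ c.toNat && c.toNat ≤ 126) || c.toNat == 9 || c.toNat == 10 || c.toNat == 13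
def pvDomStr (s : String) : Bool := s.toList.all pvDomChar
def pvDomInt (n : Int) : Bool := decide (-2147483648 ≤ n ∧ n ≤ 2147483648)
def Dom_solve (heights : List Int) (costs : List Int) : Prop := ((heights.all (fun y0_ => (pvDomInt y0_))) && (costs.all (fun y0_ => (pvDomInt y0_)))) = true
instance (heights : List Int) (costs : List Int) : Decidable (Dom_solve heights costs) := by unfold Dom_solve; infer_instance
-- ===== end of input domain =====

-- B replaces A's memoized recursion by a bottom-up iterative 3-state rolling-table DP (constant extra space).

def pvINF : Int := 10 ^ 20

-- ===== PORT A =====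
-- dfs(index, pre) ported as structural recursion over the two list suffixes
def dfsA : List Int → List Int → Int → Int
  | [], _, _ => 0
  | h :: hs, c :: cs, pre =>
      (PySem.List.pyRange 0 3 1).foldl
        (fun res i => if h + i ≠ pre then min res (c * i + dfsA hs cs (h + i)) else res) pvINF
  | _ :: _, [], _ => 0  -- Python raises IndexError here (costs exhausted); excluded by Pre_solve

def solve (heights : List Int) (costs : List Int) : Int :=
  dfsA heights costs pvINF

-- ===== PORT B =====
-- the rolling table g (a 3-element list in Source B) ported as a triple; the backward
-- index loop of Source B ported as the equivalent structural recursion over the suffix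
def gtrip : Int → List Int → List Int → Int × Int × Int
  | _, [], _ => (0, 0, 0)
  | hprev, h :: hs, c :: cs =>
      let g := gtrip h hs cs
      let getg : Int → Int := fun m => if m = 0 then g.1 else if m = 1 then g.2.1 else g.2.2
      let next : Int → Int := fun j =>
        (PySem.List.pyRange 0 3 1).foldl
          (fun best m => if h + m ≠ hprev + j then min best (c * m + getg m) else best) pvINF
      (next 0, next 1, next 2)
  | _, _ :: _, [] => (0, 0, 0)  -- Source B raises IndexError here; excluded by Pre_solve

def solve_alt (heights : List Int) (costs : List Int) : Int :=
  match heights, costs with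
  | [], _ => 0
  | h :: hs, c :: cs =>
      let g := gtrip h hs cs
      let getg : Int → Int := fun m => if m = 0 then g.1 else if m = 1 then g.2.1 else g.2.2
      (PySem.List.pyRange 0 3 1).foldl (fun best m => min best (c * m + getg m)) pvINF
  | _ :: _, [] => 0  -- Source B raises IndexError here; excluded by Pre_solve

-- ===== PRECONDITION & SPEC =====
-- Both Pythons raise IndexError when costs is shorter than heights; Pre_ excludes exactly that.
def Pre_solve (heights : List Int) (costs : List Int) : Prop := heights.length ≤ costs.length
instance (heights : List Int) (costs : List Int) : Decidable (Pre_solve heights costs) := by unfold Pre_solve; infer_instance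

def pvWitness_solve : List Int × List Int := ([1, 1, 2], [3, 1, 2])

def Spec_solve (heights : List Int) (costs : List Int) (out : Int) : Prop := out = solve_alt heights costs
instance (heights : List Int) (costs : List Int) (out : Int) : Decidable (Spec_solve heights costs out) := by unfold Spec_solve; infer_instance

-- ===== CLAIM (what is proved, stated in full; the proofs are below) =====
def Claim_equal_solve : Prop := ∀ (heights : List Int) (costs : List Int), Dom_solve heights costs → Pre_solve heights costs → Spec_solve heights costs (solve heights costs)

-- ===== LEMMAS AND PROOFS =====

-- the rolling table holds exactly the three reachable dfs values of the suffix
theorem gtrip_eq (hs : List Int) : ∀ (cs : List Int) (hprev : Int),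
    gtrip hprev hs cs = (dfsA hs cs (hprev + 0), dfsA hs cs (hprev + 1), dfsA hs cs (hprev + 2)) := by
  induction hs with
  | nil => intro cs hprev; simp [gtrip, dfsA]
  | cons h hs ih =>
      intro cs hprev
      cases cs with
      | nil => simp [gtrip, dfsA]
      | cons c cs =>
          simp only [gtrip, dfsA, ih]
          rfl

-- ===== VERDICT (by name: the statement is the Claim_ definition above) =====
theorem solve_spec : Claim_equal_solve := by
  intro heights costs hdom _hpre
  unfold Spec_solve
  cases heights with
  | nil => cases costs <;> simp [solve, solve_alt, dfsA]
  | cons h hs =>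
      cases costs with
      | nil =>
          simp [solve, solve_alt, dfsA]
      | cons c cs =>
          have hb : pvDomInt h = true := by
            simp only [Dom_solve, List.all_cons, Bool.and_eq_true] at hdom
            exact hdom.1.1
          have hne : ∀ i : Int, 0 ≤ i → i ≤ 2 → h + i ≠ pvINF := by
            intro i h0 h2
            simp only [pvDomInt, decide_eq_true_eq] at hb
            simp only [pvINF]
            omega
          simp only [solve, solve_alt, dfsA, gtrip_eq]
          have hr : PySem.List.pyRange 0 3 1 = [0, 1, 2] := rfl
          rw [hr]
          simp only [List.foldl]
          rw [if_pos (hne 0 (by norm_num) (by norm_num)),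
              if_pos (hne 1 (by norm_num) (by norm_num)),
              if_pos (hne 2 (by norm_num) (by norm_num))]
          rfl
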